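-- pv_equiv track=rewrite | github.com/jschmacht/xtandem_result_analyzer | create_reference_file.py | check_for_FP
-- ===== SOURCE A (Python) =====
-- def check_for_FP(taxid_set, taxid_ref_set):
--     for taxid in taxid_set:
--         # ignore Decoy crap entries from result_reduced (not contained in reference)
--         if taxid == 'DECOY/CRAP' or taxid == 'DECOY':
--             continue
--         else:
--             if taxid not in taxid_ref_set:
--                 return True
--     return False
-- ===== SOURCE B (Python) =====
-- def check_for_FP(taxid_set, taxid_ref_set):
--     # Sort-then-merge: a two-pointer pass over the sorted deduplicated
--     # candidates (sentinels removed) and the sorted deduplicated reference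
--     # detects any candidate missing from the reference.
--     cand = sorted(set(taxid_set) - {'DECOY/CRAP', 'DECOY'})
--     ref = sorted(set(taxid_ref_set))
--     i = 0
--     for t in cand:
--         while i < len(ref) and ref[i] < t:
--             i += 1
--         if i == len(ref) or ref[i] != t:
--             return True
--     return False
-- ===== Notes on version B (the rewrite author's own statement) =====
-- stated objective: alternative
-- what changed: Replaces A's nested membership scan (loop over candidates with an inner list-membership test and early return) by sort-then-merge: sort the deduplicated candidates minus the two DECOY sentinels and the deduplicated reference, then one two-pointer merge pass detects a candidate absent from the reference.
import Mathlib
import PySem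

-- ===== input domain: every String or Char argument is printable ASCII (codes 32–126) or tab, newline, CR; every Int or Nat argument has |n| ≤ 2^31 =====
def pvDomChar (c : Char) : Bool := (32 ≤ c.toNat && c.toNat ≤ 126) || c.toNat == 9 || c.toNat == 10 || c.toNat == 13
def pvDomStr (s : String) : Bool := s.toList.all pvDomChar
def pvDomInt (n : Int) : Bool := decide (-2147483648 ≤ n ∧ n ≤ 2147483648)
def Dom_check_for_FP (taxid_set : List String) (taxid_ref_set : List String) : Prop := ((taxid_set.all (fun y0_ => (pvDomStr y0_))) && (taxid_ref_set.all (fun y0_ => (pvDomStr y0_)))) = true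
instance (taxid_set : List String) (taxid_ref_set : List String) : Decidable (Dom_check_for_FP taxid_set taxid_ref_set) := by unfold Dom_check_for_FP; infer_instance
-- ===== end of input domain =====

-- B replaces A's nested membership scan by sort-then-merge (two-pointer pass over
-- sorted deduplicated lists); return-value equivalence only.

-- ===== PORT A =====
def check_for_FP (taxid_set : List String) (taxid_ref_set : List String) : Bool :=
  match taxid_set with
  | [] => false
  | taxid :: rest =>
    if taxid = "DECOY/CRAP" ∨ taxid = "DECOY" then
      check_for_FP rest taxid_ref_set
    else
      if ¬ (taxid ∈ taxid_ref_set) then true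
      else check_for_FP rest taxid_ref_set

-- ===== PORT B =====
-- the 'while i < len(ref) and ref[i] < t: i += 1' loop, with the pointer as a suffix
def pvAdvance (t : String) : List String → List String
  | [] => []
  | r :: rs => if r < t then pvAdvance t rs else r :: rs

-- the 'for t in cand' merge pass
def pvMergeScan : List String → List String → Bool
  | [], _ => false
  | t :: ts, ref =>
    match pvAdvance t ref with
    | [] => true
    | r :: rs => if r ≠ t then true else pvMergeScan ts (r :: rs)

def check_for_FP_alt (taxid_set : List String) (taxid_ref_set : List String) : Bool :=
  pvMergeScan
    (PySem.List.sorted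
      (PySem.Set.diff (PySem.Set.ofList taxid_set) ["DECOY/CRAP", "DECOY"])
      (fun x => x) false)
    (PySem.List.sorted (PySem.Set.ofList taxid_ref_set) (fun x => x) false)

-- ===== PRECONDITION & SPEC =====
def Spec_check_for_FP (taxid_set : List String) (taxid_ref_set : List String) (out : Bool) : Prop := out = check_for_FP_alt taxid_set taxid_ref_set
instance (taxid_set : List String) (taxid_ref_set : List String) (out : Bool) : Decidable (Spec_check_for_FP taxid_set taxid_ref_set out) := by unfold Spec_check_for_FP; infer_instance

-- ===== CLAIM (what is proved, stated in full; the proofs are below) =====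
def Claim_equal_check_for_FP : Prop := ∀ (taxid_set : List String) (taxid_ref_set : List String), Dom_check_for_FP taxid_set taxid_ref_set → Spec_check_for_FP taxid_set taxid_ref_set (check_for_FP taxid_set taxid_ref_set)

-- ===== LEMMAS AND PROOFS =====

theorem checkA_iff (s r : List String) :
    check_for_FP s r = true ↔
      ∃ t ∈ s, ¬(t = "DECOY/CRAP" ∨ t = "DECOY") ∧ t ∉ r := by
  induction s with
  | nil => simp [check_for_FP]
  | cons x xs ih =>
    simp only [check_for_FP]
    by_cases h1 : x = "DECOY/CRAP" ∨ x = "DECOY"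
    · simp only [if_pos h1, ih, List.mem_cons]
      constructor
      · rintro ⟨t, ht, h⟩; exact ⟨t, Or.inr ht, h⟩
      · rintro ⟨t, ht | ht, h⟩
        · subst ht; exact absurd h1 h.1
        · exact ⟨t, ht, h⟩
    · by_cases h2 : x ∈ r
      · simp only [if_neg h1, if_neg (not_not_intro h2), ih, List.mem_cons]
        constructor
        · rintro ⟨t, ht, h⟩; exact ⟨t, Or.inr ht, h⟩
        · rintro ⟨t, ht | ht, h⟩
          · subst ht; exact absurd h2 h.2
          · exact ⟨t, ht, h⟩
      · simp only [if_neg h1, if_pos h2, List.mem_cons, true_iff]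
        exact ⟨x, Or.inl rfl, h1, h2⟩

-- dropped elements are < t ≤ u, hence membership of u is preserved
theorem mem_pvAdvance (t u : String) (h : t ≤ u) (ref : List String) :
    u ∈ ref ↔ u ∈ pvAdvance t ref := by
  induction ref with
  | nil => simp [pvAdvance]
  | cons r rs ih =>
    by_cases hr : r < t
    · have hru : u ≠ r := (ne_of_lt (lt_of_lt_of_le hr h)).symm
      simp [pvAdvance, hr, hru, ih]
    · simp [pvAdvance, hr]

theorem pvAdvance_sublist (t : String) (ref : List String) :
    (pvAdvance t ref).Sublist ref := by
  induction ref with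
  | nil => simp [pvAdvance]
  | cons r rs ih =>
    by_cases hr : r < t
    · simpa [pvAdvance, hr] using ih.trans (List.sublist_cons_self r rs)
    · simp [pvAdvance, hr]

theorem pvAdvance_head_not_lt (t r : String) (rs ref : List String)
    (h : pvAdvance t ref = r :: rs) : ¬ r < t := by
  induction ref with
  | nil => simp [pvAdvance] at h
  | cons x xs ih =>
    by_cases hx : x < t
    · exact ih (by simpa [pvAdvance, hx] using h)
    · simp only [pvAdvance, if_neg hx] at h
      injection h with h1 h2
      exact h1 ▸ hx

theorem mergeScan_iff (cand ref : List String)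
    (hc : cand.Pairwise (· ≤ ·)) (hr : ref.Pairwise (· < ·)) :
    pvMergeScan cand ref = true ↔ ∃ t ∈ cand, t ∉ ref := by
  induction cand generalizing ref with
  | nil => simp [pvMergeScan]
  | cons t ts ih =>
    have hts := (List.pairwise_cons.mp hc).2
    have htle := (List.pairwise_cons.mp hc).1
    have hmem : ∀ u, t ≤ u → (u ∈ ref ↔ u ∈ pvAdvance t ref) := fun u h => mem_pvAdvance t u h ref
    have hr' : (pvAdvance t ref).Pairwise (· < ·) := hr.sublist (pvAdvance_sublist t ref)
    cases hadv : pvAdvance t ref with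
    | nil =>
      have hnot : t ∉ ref := by
        rw [hmem t le_rfl, hadv]; simp
      have hred : pvMergeScan (t :: ts) ref = true := by simp [pvMergeScan, hadv]
      rw [hred]
      simp only [true_iff]
      exact ⟨t, List.mem_cons_self .., hnot⟩
    | cons r rs =>
      have hrnlt : ¬ r < t := pvAdvance_head_not_lt t r rs ref hadv
      rw [hadv] at hr' hmem
      by_cases hrt : r = t
      · subst hrt
        have hred : pvMergeScan (r :: ts) ref = pvMergeScan ts (r :: rs) := by
          simp [pvMergeScan, hadv]
        rw [hred, ih (r :: rs) hts hr']
        constructor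
        · rintro ⟨u, hu, hnot⟩
          refine ⟨u, List.mem_cons_of_mem _ hu, fun hmemref => hnot ?_⟩
          exact (hmem u (htle u hu)).mp hmemref
        · rintro ⟨u, hu0, hnot⟩
          rcases List.mem_cons.mp hu0 with hu | hu
          · subst hu
            exact absurd ((hmem u le_rfl).mpr (List.mem_cons_self ..)) hnot
          · exact ⟨u, hu, fun h => hnot ((hmem u (htle u hu)).mpr h)⟩
      · have htr : t < r := lt_of_le_of_ne (le_of_not_gt hrnlt) (fun h => hrt h.symm)
        have hnot : t ∉ ref := by
          rw [hmem t le_rfl]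
          intro h
          rcases List.mem_cons.mp h with h | h
          · exact hrt h.symm
          · exact absurd (htr.trans ((List.pairwise_cons.mp hr').1 t h)) (lt_irrefl t)
        have hred : pvMergeScan (t :: ts) ref = true := by simp [pvMergeScan, hadv, hrt]
        rw [hred]
        simp only [true_iff]
        exact ⟨t, List.mem_cons_self .., hnot⟩

theorem checkB_iff (s r : List String) :
    check_for_FP_alt s r = true ↔
      ∃ t ∈ s, ¬(t = "DECOY/CRAP" ∨ t = "DECOY") ∧ t ∉ r := by
  unfold check_for_FP_alt
  rw [mergeScan_iff _ _
      (PySem.List.sorted_pairwise _ _)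
      ((PySem.List.sorted_ofList_pairwise_lt r))]
  constructor
  · rintro ⟨t, ht, hnot⟩
    rw [PySem.List.mem_sorted, PySem.Set.mem_diff, PySem.Set.mem_ofList] at ht
    refine ⟨t, ht.1, by simpa using ht.2, fun h => hnot ?_⟩
    rw [PySem.List.mem_sorted, PySem.Set.mem_ofList]; exact h
  · rintro ⟨t, hs, hd, hr⟩
    refine ⟨t, ?_, fun h => hr ?_⟩
    · rw [PySem.List.mem_sorted, PySem.Set.mem_diff, PySem.Set.mem_ofList]
      exact ⟨hs, by simpa using hd⟩
    · rw [PySem.List.mem_sorted, PySem.Set.mem_ofList] at h; exact h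

-- ===== VERDICT (by name: the statement is the Claim_ definition above) =====
theorem check_for_FP_spec : Claim_equal_check_for_FP := by
  intro s r _
  unfold Spec_check_for_FP
  rw [Bool.eq_iff_iff, checkA_iff, checkB_iff]
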